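-- pv_equiv track=rewrite | github.com/dcclyde/coding_puzzles | codejam/2021_q/B.py | solve
-- ===== SOURCE A (Python) =====
-- def solve(X, Y, dat):
--     recent = '.'
--     out = 0
--     for c in dat:
--         if c not in 'JC':
--             continue
--         if c != recent:
--             if recent == '.':
--                 recent = c
--                 continue
--             recent = c
--             if c == 'C':
--                 out += Y
--             else:
--                 out += X
--
--     return out
-- ===== SOURCE B (Python) =====
-- def solve(X, Y, dat):
--     t = ''.join(c for c in dat if c in 'JC')
--     return X * t.count('CJ') + Y * t.count('JC')
-- ===== Notes on version B (the rewrite author's own statement) =====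
-- stated objective: alternative
-- what changed: Replaces A's stateful 'recent' accumulator walk by building the J/C-filtered string and computing the answer as X times the number of 'CJ' substring occurrences plus Y times the number of 'JC' occurrences via str.count, with no per-transition scan or state machine.
import Mathlib
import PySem

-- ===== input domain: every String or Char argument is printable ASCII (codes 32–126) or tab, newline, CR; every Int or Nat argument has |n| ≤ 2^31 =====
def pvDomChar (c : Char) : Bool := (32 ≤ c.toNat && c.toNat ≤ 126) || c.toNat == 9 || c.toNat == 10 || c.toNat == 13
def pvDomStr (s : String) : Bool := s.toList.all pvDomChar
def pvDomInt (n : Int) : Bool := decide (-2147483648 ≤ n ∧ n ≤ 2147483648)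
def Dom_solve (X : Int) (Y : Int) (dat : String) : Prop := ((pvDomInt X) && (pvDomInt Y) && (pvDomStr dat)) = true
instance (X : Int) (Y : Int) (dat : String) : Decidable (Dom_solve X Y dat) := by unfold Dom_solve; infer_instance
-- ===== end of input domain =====

-- B replaces A's stateful 'recent' accumulator walk by building the J/C-filtered string and
-- returning X * t.count('CJ') + Y * t.count('JC') (objective: alternative; same O(n) cost).


-- ===== PORT A =====
-- one iteration of A's loop body over the state (recent, out)
def solveStep (X : Int) (Y : Int) (s : Char × Int) (c : Char) : Char × Int :=
  if !(c == 'J' || c == 'C') then s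
  else if c != s.1 then
    if s.1 == '.' then (c, s.2)
    else (c, s.2 + (if c == 'C' then Y else X))
  else s

def solve (X : Int) (Y : Int) (dat : String) : Int :=
  (dat.toList.foldl (solveStep X Y) ('.', 0)).2

-- ===== PORT B =====
def solve_alt (X : Int) (Y : Int) (dat : String) : Int :=
  let t := String.ofList (dat.toList.filter (fun c => c == 'J' || c == 'C'))
  X * (PySem.Str.count t "CJ" : Int) + Y * (PySem.Str.count t "JC" : Int)

-- ===== PRECONDITION & SPEC =====
def Spec_solve (X : Int) (Y : Int) (dat : String) (out : Int) : Prop := out = solve_alt X Y dat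
instance (X : Int) (Y : Int) (dat : String) (out : Int) : Decidable (Spec_solve X Y dat out) := by unfold Spec_solve; infer_instance

-- ===== CLAIM (what is proved, stated in full; the proofs are below) =====
def Claim_equal_solve : Prop := ∀ (X : Int) (Y : Int) (dat : String), Dom_solve X Y dat → Spec_solve X Y dat (solve X Y dat)

-- ===== LEMMAS AND PROOFS =====

-- number of adjacent (a, b) pairs in a list
def adjP (a b : Char) : List Char → Nat
  | x :: y :: t => (if x = a ∧ y = b then 1 else 0) + adjP a b (y :: t)
  | _ => 0

-- recursive pairwise-cost of adjacent unequal characters (characterises A's loop)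
def pairSum (X : Int) (Y : Int) : List Char → Int
  | a :: b :: t => (if a != b then (if b == 'J' then X else Y) else 0) + pairSum X Y (b :: t)
  | _ => 0

theorem step_skip (X Y : Int) (s : Char × Int) (c : Char)
    (h : (c == 'J' || c == 'C') = false) : solveStep X Y s c = s := by
  simp [solveStep, h]

theorem step_same (X Y : Int) (out : Int) (c : Char) :
    solveStep X Y (c, out) c = (c, out) := by
  unfold solveStep; split <;> simp

theorem step_new (X Y : Int) (out : Int) (c r : Char)
    (h : (c == 'J' || c == 'C') = true) (hcr : c ≠ r) (hrd : r ≠ '.') :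
    solveStep X Y (r, out) c = (c, out + (if c == 'C' then Y else X)) := by
  simp [solveStep, h, hcr, hrd]

theorem step_seed (X Y : Int) (out : Int) (c : Char)
    (h : (c == 'J' || c == 'C') = true) (hcd : c ≠ '.') :
    solveStep X Y ('.', out) c = (c, out) := by
  simp [solveStep, h, hcd]

theorem pairSum_cons_ne (X Y : Int) (r c : Char) (t : List Char) (h : r ≠ c) :
    pairSum X Y (r :: c :: t) = (if c == 'J' then X else Y) + pairSum X Y (c :: t) := by
  simp [pairSum, h]

theorem foldA_run (X Y : Int) (l : List Char) (r : Char) (out : Int)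
    (hr : r = 'J' ∨ r = 'C') :
    (l.foldl (solveStep X Y) (r, out)).2 = out + pairSum X Y (r :: l.filter (fun c => c == 'J' || c == 'C')) := by
  induction l generalizing r out with
  | nil => simp [pairSum]
  | cons c t ih =>
    by_cases hc : c = 'J' ∨ c = 'C'
    · have hfil : (c == 'J' || c == 'C') = true := by
        rcases hc with h | h <;> simp [h]
      by_cases hcr : c = r
      · subst hcr
        simp only [List.foldl_cons, step_same]
        rw [ih _ _ hc]
        simp [pairSum, List.filter_cons, hfil]
      · have hrd : r ≠ '.' := by rcases hr with h | h <;> simp [h]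
        simp only [List.foldl_cons, step_new X Y out c r hfil hcr hrd]
        rw [ih _ _ hc]
        simp only [List.filter_cons, hfil, if_pos]
        rw [pairSum_cons_ne X Y r c _ (Ne.symm hcr)]
        have hcost : (if c == 'C' then Y else X) = (if c == 'J' then X else Y) := by
          rcases hc with h | h <;> subst h <;> simp
        rw [hcost]; ring
    · have hfil : (c == 'J' || c == 'C') = false := by
        simp only [not_or] at hc; simp [hc.1, hc.2]
      simp only [List.foldl_cons, step_skip X Y (r, out) c hfil]
      rw [ih _ _ hr]
      simp [List.filter_cons, hfil]

theorem foldA_start (X Y : Int) (l : List Char) (out : Int) :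
    (l.foldl (solveStep X Y) ('.', out)).2 = out + pairSum X Y (l.filter (fun c => c == 'J' || c == 'C')) := by
  induction l generalizing out with
  | nil => simp [pairSum]
  | cons c t ih =>
    by_cases hc : c = 'J' ∨ c = 'C'
    · have hfil : (c == 'J' || c == 'C') = true := by
        rcases hc with h | h <;> simp [h]
      have hcd : c ≠ '.' := by rcases hc with h | h <;> simp [h]
      simp only [List.foldl_cons, step_seed X Y out c hfil hcd]
      rw [foldA_run X Y t c out hc]
      simp [List.filter_cons, hfil]
    · have hfil : (c == 'J' || c == 'C') = false := by
        simp only [not_or] at hc; simp [hc.1, hc.2]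
      simp only [List.foldl_cons, step_skip X Y ('.', out) c hfil]
      rw [ih]
      simp [List.filter_cons, hfil]

-- a list over the alphabet {'J','C'}: pairSum splits into the two directed adjacency counts
theorem pairSum_eq_adjP (X Y : Int) (l : List Char) (hl : ∀ c ∈ l, c = 'J' ∨ c = 'C') :
    pairSum X Y l = X * (adjP 'C' 'J' l : Int) + Y * (adjP 'J' 'C' l : Int) := by
  induction l with
  | nil => simp [pairSum, adjP]
  | cons a t ih =>
    cases t with
    | nil => simp [pairSum, adjP]
    | cons b t' =>
      have ha := hl a (by simp)
      have hb := hl b (by simp)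
      have ih' := ih (fun c hc => hl c (List.mem_cons_of_mem a hc))
      rcases ha with ha | ha <;> rcases hb with hb | hb <;> subst ha <;> subst hb <;>
        simp [pairSum, adjP, ih'] <;> push_cast <;> ring

-- Chars.count.go on a two-letter pattern with distinct letters counts directed adjacencies
theorem go_eq_adjP (a b : Char) (hab : a ≠ b) :
    ∀ (fuel : Nat) (l : List Char) (acc : Nat), l.length ≤ fuel →
      PySem.Chars.count.go [a, b] fuel l acc = acc + adjP a b l := by
  intro fuel
  induction fuel with
  | zero =>
    intro l acc hlen
    have : l = [] := List.eq_nil_of_length_eq_zero (Nat.le_zero.mp hlen)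
    subst this
    simp [PySem.Chars.count.go, adjP]
  | succ n ih =>
    intro l acc hlen
    cases l with
    | nil => simp [PySem.Chars.count.go, adjP]
    | cons x t =>
      by_cases hpre : [a, b].isPrefixOf (x :: t) = true
      · -- x = a and t = b :: rest
        cases t with
        | nil => simp [List.isPrefixOf] at hpre
        | cons y rest =>
        obtain ⟨hx1, hx2⟩ : a = x ∧ b = y := by
          simpa [List.isPrefixOf] using hpre
        subst hx1; subst hx2
        rw [PySem.Chars.count.go]
        simp only [hpre, if_true]
        have hlen' : rest.length ≤ n := by
          simp at hlen; omega
        have := ih rest (acc + 1) hlen'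
        simp only [List.length_cons] at this ⊢
        have hdrop : List.drop (([] : List Char).length + 1 + 1) (a :: b :: rest) = rest := by simp
        rw [hdrop, this]
        -- adjP a b (a :: b :: rest) = 1 + adjP a b rest  (needs a ≠ b for the middle pair)
        have hmid : adjP a b (b :: rest) = adjP a b rest := by
          cases rest with
          | nil => simp [adjP]
          | cons y t' =>
            have : ¬ (b = a ∧ y = b) := fun h => hab h.1.symm
            simp [adjP, this]
        simp [adjP, hmid]; omega
      · rw [PySem.Chars.count.go]
        simp only [hpre, if_false]
        have hlen' : t.length ≤ n := by simp at hlen; omega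
        rw [ih t acc hlen']
        -- the head pair does not match: adjP on x :: t keeps only the tail pairs
        cases t with
        | nil => simp [adjP]
        | cons y t' =>
          have hnm : ¬ (x = a ∧ y = b) := by
            intro ⟨h1, h2⟩
            subst h1; subst h2
            simp [List.isPrefixOf] at hpre
          simp [adjP, hnm]

theorem count_eq_adjP (a b : Char) (hab : a ≠ b) (l : List Char) :
    PySem.Chars.count l [a, b] = adjP a b l := by
  unfold PySem.Chars.count
  simp [go_eq_adjP a b hab l.length l 0 (le_refl _)]

-- ===== VERDICT (by name: the statement is the Claim_ definition above) =====
theorem solve_spec : Claim_equal_solve := by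
  intro X Y dat _
  unfold Spec_solve solve solve_alt
  rw [foldA_start]
  have hfil : ∀ c ∈ dat.toList.filter (fun c => c == 'J' || c == 'C'), c = 'J' ∨ c = 'C' := by
    intro c hc
    have := (List.mem_filter.mp hc).2
    rcases Bool.or_eq_true_iff.mp this with h | h
    · exact Or.inl (by simpa using h)
    · exact Or.inr (by simpa using h)
  rw [pairSum_eq_adjP X Y _ hfil]
  simp only [PySem.Str.count_eq]
  have hCJ : ("CJ" : String).toList = ['C', 'J'] := rfl
  have hJC : ("JC" : String).toList = ['J', 'C'] := rfl
  rw [show (String.ofList (dat.toList.filter (fun c => c == 'J' || c == 'C'))).toList = dat.toList.filter (fun c => c == 'J' || c == 'C') by simp]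
  rw [hCJ, hJC, count_eq_adjP _ _ (by decide), count_eq_adjP _ _ (by decide)]
  ring
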